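-- pv_equiv track=rewrite | github.com/OliverGilan/Encryption | CBC/sbdecrypt.py | get_16_bytes
-- ===== SOURCE A (Python) =====
-- def get_16_bytes(seed, depth):
--     m = 256
--     a = 1103515245
--     c = 12345
--     first = ((a * seed) + c) % m
--     if depth == 15:
--         return str(first)
--     return str(first) + get_16_bytes(first, depth + 1)
-- ===== SOURCE B (Python) =====
-- def get_16_bytes(seed, depth):
--     m = 256
--     a = 1103515245
--     c = 12345
--     vals = []
--     x = seed
--     for _ in range(16 - depth):
--         x = ((a * x) + c) % m
--         vals.append(x)
--     return ''.join(str(v) for v in vals)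
-- ===== Notes on version B (the rewrite author's own statement) =====
-- stated objective: alternative
-- what changed: Replaced the self-recursion that interleaves formatting and concatenation with a count-based loop (range(16-depth)) that first generates the pure integer LCG sequence and then joins its string forms in one pass.
import Mathlib
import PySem

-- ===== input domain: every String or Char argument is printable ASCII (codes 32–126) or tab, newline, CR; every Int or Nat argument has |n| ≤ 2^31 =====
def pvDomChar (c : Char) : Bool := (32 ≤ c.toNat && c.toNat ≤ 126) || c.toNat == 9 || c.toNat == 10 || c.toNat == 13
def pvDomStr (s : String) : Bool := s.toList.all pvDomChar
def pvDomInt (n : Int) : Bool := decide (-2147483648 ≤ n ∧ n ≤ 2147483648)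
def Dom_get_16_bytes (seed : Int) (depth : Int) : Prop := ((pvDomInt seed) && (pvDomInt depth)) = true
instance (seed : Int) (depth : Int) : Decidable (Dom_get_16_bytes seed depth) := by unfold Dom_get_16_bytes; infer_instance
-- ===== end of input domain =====

-- B generates the pure integer LCG sequence with a count-based loop and joins its string
-- forms once, instead of A's recursion interleaving formatting and concatenation;
-- equality is proved on depth ≤ 15 (for depth > 15 the Python A never terminates).

-- ===== PORT A =====
-- A's recursion terminates exactly when depth ≤ 15; the Lean port carries fuel
-- (16 - depth).toNat, exactly enough steps on the admitted inputs (Pre_: depth ≤ 15).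
def get_16_bytes_goA (fuel : Nat) (seed : Int) (depth : Int) : String :=
  match fuel with
  | 0 => ""   -- unreachable when depth ≤ 15
  | fuel + 1 =>
    let first := PySem.Int.mod (1103515245 * seed + 12345) 256
    if depth == 15 then PySem.Int.toStr first
    else PySem.Int.toStr first ++ get_16_bytes_goA fuel first (depth + 1)

def get_16_bytes (seed : Int) (depth : Int) : String :=
  get_16_bytes_goA (16 - depth).toNat seed depth

-- ===== PORT B =====
-- the integer sequence: n successive LCG states starting from x
def get_16_bytes_lcgList (n : Nat) (x : Int) : List Int :=
  match n with
  | 0 => []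
  | n + 1 =>
    let y := PySem.Int.mod (1103515245 * x + 12345) 256
    y :: get_16_bytes_lcgList n y

def get_16_bytes_alt (seed : Int) (depth : Int) : String :=
  String.join ((get_16_bytes_lcgList (16 - depth).toNat seed).map PySem.Int.toStr)

-- ===== PRECONDITION & SPEC =====
-- Pre_ excludes depth > 15, where the Python A recurses forever (RecursionError).
def Pre_get_16_bytes (seed : Int) (depth : Int) : Prop := depth ≤ 15
instance (seed : Int) (depth : Int) : Decidable (Pre_get_16_bytes seed depth) := by
  unfold Pre_get_16_bytes; infer_instance
def pvWitness_get_16_bytes : Int × Int := (42, 0)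

def Spec_get_16_bytes (seed : Int) (depth : Int) (out : String) : Prop := out = get_16_bytes_alt seed depth
instance (seed : Int) (depth : Int) (out : String) : Decidable (Spec_get_16_bytes seed depth out) := by unfold Spec_get_16_bytes; infer_instance

-- ===== CLAIM (what is proved, stated in full; the proofs are below) =====
def Claim_equal_get_16_bytes : Prop := ∀ (seed : Int) (depth : Int), Dom_get_16_bytes seed depth → Pre_get_16_bytes seed depth → Spec_get_16_bytes seed depth (get_16_bytes seed depth)

-- ===== LEMMAS AND PROOFS =====
theorem str_foldl_append (l : List String) :
    ∀ (s t : String), List.foldl (fun r x => r ++ x) (s ++ t) l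
      = s ++ List.foldl (fun r x => r ++ x) t l := by
  induction l with
  | nil => intro s t; rfl
  | cons x xs ih => intro s t; simpa [String.append_assoc] using ih s (t ++ x)

theorem goA_eq_join (fuel : Nat) :
    ∀ (seed depth : Int), depth ≤ 15 → fuel = (16 - depth).toNat →
    get_16_bytes_goA fuel seed depth =
      String.join ((get_16_bytes_lcgList fuel seed).map PySem.Int.toStr) := by
  induction fuel with
  | zero => intro _ _ h hf; omega
  | succ fuel ih =>
    intro seed depth hle hf
    simp only [get_16_bytes_goA, get_16_bytes_lcgList, List.map, String.join]
    by_cases h : depth = 15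
    · have : fuel = 0 := by omega
      simp [h, this, get_16_bytes_lcgList]
    · have hne : (depth == 15) = false := by simp [h]
      rw [hne]
      simp only [Bool.false_eq_true, if_false]
      rw [ih _ (depth + 1) (by omega) (by omega)]
      simp only [String.join]
      simpa using (str_foldl_append _ (PySem.Int.toStr (PySem.Int.mod (1103515245 * seed + 12345) 256)) "").symm

-- ===== VERDICT (by name: the statement is the Claim_ definition above) =====
theorem get_16_bytes_spec : Claim_equal_get_16_bytes := by
  intro seed depth _ hpre
  unfold Spec_get_16_bytes get_16_bytes get_16_bytes_alt
  exact goA_eq_join _ seed depth hpre rfl
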